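-- pv_equiv track=rewrite | github.com/MatthewAndreTaylor/Sokoboards | main.py | generate_boards
-- ===== SOURCE A (Python) =====
-- def generate_boards(config):
--     empty_cells = []
--     x, y = None, None
--     boxes = []
--     goals = []
--
--     for i in range(len(config)):
--         for j in range(len(config[i])):
--             if config[i][j] == ' ':
--                 empty_cells.append((i, j))
--                 new_board = [list(row) for row in config]
--                 new_board[i][j] = '#'
--                 yield [''.join(row) for row in new_board]
--             if config[i][j] == '@':
--                 x, y = i, j
--             if config[i][j] == '$':
--                 boxes.append((i, j))
--             if config[i][j] == '*':
--                 goals.append((i, j))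
--
--     for i, j in empty_cells:
--         new_board = [list(row) for row in config]
--         new_board[i][j] = '@'
--         new_board[x][y] = ' '
--         yield [''.join(row) for row in new_board]
--
--         for h, k in boxes:
--                 new_board = [list(row) for row in config]
--                 new_board[i][j] = '$'
--                 new_board[h][k] = ' '
--                 yield [''.join(row) for row in new_board]
--
--         for h, k in goals:
--                 new_board = [list(row) for row in config]
--                 new_board[i][j] = '*'
--                 new_board[h][k] = ' '
--                 yield [''.join(row) for row in new_board]
-- ===== SOURCE B (Python) =====
-- def generate_boards(config):
--     # Collect positions in one scan, build a table of edit operations, then emit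
--     # each board from the table.  (Same yielded sequence as the original; when a
--     # board has empty cells but no player, both raise TypeError.)
--     empty_cells = []
--     player = None
--     boxes = []
--     goals = []
--     for i, row in enumerate(config):
--         for j, c in enumerate(row):
--             if c == ' ':
--                 empty_cells.append((i, j))
--             elif c == '@':
--                 player = (i, j)
--             elif c == '$':
--                 boxes.append((i, j))
--             elif c == '*':
--                 goals.append((i, j))
--
--     ops = [[(i, j, '#')] for (i, j) in empty_cells]
--     for (i, j) in empty_cells:
--         ops.append([(i, j, '@'), player + (' ',)])
--         for b in boxes:
--             ops.append([(i, j, '$'), b + (' ',)])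
--         for g in goals:
--             ops.append([(i, j, '*'), g + (' ',)])
--
--     for edits in ops:
--         board = [list(row) for row in config]
--         for (i, j, c) in edits:
--             board[i][j] = c
--         yield [''.join(row) for row in board]
-- ===== Notes on version B (the rewrite author's own statement) =====
-- stated objective: alternative
-- what changed: B replaces A's inline yields at three nested loop sites by collect-then-emit: one scan gathers positions only, a table of edit operations (lists of (row,col,char) edits) is built, and one flat loop applies each op to a fresh board and emits it.
import Mathlib
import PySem

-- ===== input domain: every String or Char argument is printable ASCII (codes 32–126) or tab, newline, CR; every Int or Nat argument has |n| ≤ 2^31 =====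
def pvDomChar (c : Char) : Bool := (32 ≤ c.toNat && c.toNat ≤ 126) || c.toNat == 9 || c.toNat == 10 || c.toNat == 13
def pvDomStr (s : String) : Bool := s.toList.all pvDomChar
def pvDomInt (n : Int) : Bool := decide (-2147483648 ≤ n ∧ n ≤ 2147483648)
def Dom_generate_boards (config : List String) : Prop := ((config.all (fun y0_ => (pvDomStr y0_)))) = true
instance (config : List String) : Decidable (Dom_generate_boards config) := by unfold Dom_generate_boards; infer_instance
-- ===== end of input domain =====

-- B replaces A's inline yields at three nested loop sites by collect-then-emit over an explicit
-- table of edit operations (objective: alternative decomposition, same cost).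
-- Both Pythons are generators; the equivalence is about the full yielded sequence (list(...)).

-- ===== PORT A =====
-- shared board helpers: fresh copy of config, single-cell assignment, join rows back to strings
def pvCopy (config : List String) : List (List Char) := config.map (fun row => row.toList)
-- indices fed to pvSetCell come from range/enumerate, hence are ≥ 0: toNat is exact there
def pvSetCell (b : List (List Char)) (i j : Int) (c : Char) : List (List Char) :=
  b.modify i.toNat (fun row => row.set j.toNat c)
def pvRender (b : List (List Char)) : List String := b.map (fun row => String.mk row)

abbrev PvStA := List (Int × Int) × Option (Int × Int) × List (Int × Int) × List (Int × Int) × List (List String)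

-- body of A's scan loop: the four independent `if`s on config[i][j]
def pvStepA (config : List String) : PvStA → Int → Int → Char → PvStA
  | (empty_cells, xy, boxes, goals, out), i, j, c =>
    let ep := if c = ' ' then
        (empty_cells ++ [(i, j)], out ++ [pvRender (pvSetCell (pvCopy config) i j '#')])
      else (empty_cells, out)
    let xy := if c = '@' then some (i, j) else xy
    let boxes := if c = '$' then boxes ++ [(i, j)] else boxes
    let goals := if c = '*' then goals ++ [(i, j)] else goals
    (ep.1, xy, boxes, goals, ep.2)

-- A's first phase: for i in range(len(config)): for j in range(len(config[i])): …
def pvScanA (config : List String) : PvStA :=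
  (PySem.List.pyRange 0 (PySem.List.len config) 1).foldl (fun st i =>
    let row := (PySem.List.pyGetD config i "").toList
    (PySem.List.pyRange 0 (PySem.List.len row) 1).foldl (fun st j =>
      pvStepA config st i j (PySem.List.pyGetD row j '?')) st)
    ([], none, [], [], [])

def generate_boards (config : List String) : List (List String) :=
  match pvScanA config with
  | (empty_cells, xy, boxes, goals, out) =>
    empty_cells.foldl (fun out ij =>
      let xv := xy.getD (0, 0)   -- x,y = None never reached under Pre_ (Python: TypeError)
      let out := out ++ [pvRender (pvSetCell (pvSetCell (pvCopy config) ij.1 ij.2 '@') xv.1 xv.2 ' ')]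
      let out := boxes.foldl (fun out hk =>
        out ++ [pvRender (pvSetCell (pvSetCell (pvCopy config) ij.1 ij.2 '$') hk.1 hk.2 ' ')]) out
      goals.foldl (fun out hk =>
        out ++ [pvRender (pvSetCell (pvSetCell (pvCopy config) ij.1 ij.2 '*') hk.1 hk.2 ' ')]) out) out

-- ===== PORT B =====
abbrev PvStB := List (Int × Int) × Option (Int × Int) × List (Int × Int) × List (Int × Int)

-- body of B's collection scan: if/elif chain, no emission
def pvStepB : PvStB → Int → Int → Char → PvStB
  | (empty_cells, player, boxes, goals), i, j, c =>
    if c = ' ' then (empty_cells ++ [(i, j)], player, boxes, goals)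
    else if c = '@' then (empty_cells, some (i, j), boxes, goals)
    else if c = '$' then (empty_cells, player, boxes ++ [(i, j)], goals)
    else if c = '*' then (empty_cells, player, boxes, goals ++ [(i, j)])
    else (empty_cells, player, boxes, goals)

def pvScanB (config : List String) : PvStB :=
  (PySem.List.enumerate config 0).foldl (fun st p =>
    (PySem.List.enumerate p.2.toList 0).foldl (fun st q => pvStepB st p.1 q.1 q.2) st)
    ([], none, [], [])

-- the table of change operations, each a list of (row, col, char) edits
def pvOps (empty_cells : List (Int × Int)) (player : Int × Int) (boxes goals : List (Int × Int)) :
    List (List (Int × Int × Char)) :=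
  empty_cells.map (fun ij => [(ij.1, ij.2, '#')]) ++
  empty_cells.flatMap (fun ij =>
    [[(ij.1, ij.2, '@'), (player.1, player.2, ' ')]] ++
    boxes.map (fun hk => [(ij.1, ij.2, '$'), (hk.1, hk.2, ' ')]) ++
    goals.map (fun hk => [(ij.1, ij.2, '*'), (hk.1, hk.2, ' ')]))

-- emit one board: fresh copy, apply the edits in order, join
def pvApplyOp (config : List String) (edits : List (Int × Int × Char)) : List String :=
  pvRender (edits.foldl (fun b e => pvSetCell b e.1 e.2.1 e.2.2) (pvCopy config))

def generate_boards_alt (config : List String) : List (List String) :=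
  match pvScanB config with
  | (empty_cells, player, boxes, goals) =>
    (pvOps empty_cells (player.getD (0, 0)) boxes goals).map (pvApplyOp config)

-- ===== PRECONDITION & SPEC =====
-- Pre_ excludes exactly the boards that have an empty cell but no player '@': there both
-- Pythons raise TypeError (None coordinates) instead of yielding the move boards.
def Pre_generate_boards (config : List String) : Prop :=
  config.any (fun row => row.toList.contains ' ') = true →
  config.any (fun row => row.toList.contains '@') = true
instance (config : List String) : Decidable (Pre_generate_boards config) := by
  unfold Pre_generate_boards; infer_instance

def pvWitness_generate_boards : List String := ["# #", "#@#"]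

def Spec_generate_boards (config : List String) (out : List (List String)) : Prop := out = generate_boards_alt config
instance (config : List String) (out : List (List String)) : Decidable (Spec_generate_boards config out) := by unfold Spec_generate_boards; infer_instance

-- ===== CLAIM (what is proved, stated in full; the proofs are below) =====
def Claim_equal_generate_boards : Prop := ∀ (config : List String), Dom_generate_boards config → Pre_generate_boards config → Spec_generate_boards config (generate_boards config)

-- ===== LEMMAS AND PROOFS =====

-- the wall board for an empty cell
def pvWall (config : List String) (i j : Int) : List String :=
  pvRender (pvSetCell (pvCopy config) i j '#')

@[simp] lemma applyOp_single (config : List String) (i j : Int) (c : Char) :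
    pvApplyOp config [(i, j, c)] = pvRender (pvSetCell (pvCopy config) i j c) := rfl

@[simp] lemma applyOp_pair (config : List String) (i j h k : Int) (c c' : Char) :
    pvApplyOp config [(i, j, c), (h, k, c')]
      = pvRender (pvSetCell (pvSetCell (pvCopy config) i j c) h k c') := rfl

-- bridge: A's index loop over range(len(xs)) is a loop over enumerate(xs)
lemma foldl_pyRange_enum {α σ : Type} (xs : List α) (d : α) (f : σ → Int → α → σ) (s : σ) :
    (PySem.List.pyRange 0 (PySem.List.len xs) 1).foldl
        (fun st j => f st j (PySem.List.pyGetD xs j d)) s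
      = (PySem.List.enumerate xs 0).foldl (fun st q => f st q.1 q.2) s := by
  rw [PySem.List.enumerate_eq_map_pyRange (d := d), List.foldl_map]

lemma scanA_enum (config : List String) :
    pvScanA config
      = (PySem.List.enumerate config 0).foldl (fun st p =>
          (PySem.List.enumerate p.2.toList 0).foldl (fun st q => pvStepA config st p.1 q.1 q.2) st)
          ([], none, [], [], []) := by
  unfold pvScanA
  refine Eq.trans (PySem.List.foldl_congr_mem _ _ _ _ ?_)
    (foldl_pyRange_enum config ""
      (fun st i row => (PySem.List.enumerate row.toList 0).foldl
        (fun st q => pvStepA config st i q.1 q.2) st) ([], none, [], [], []))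
  intro st i _
  exact foldl_pyRange_enum ((PySem.List.pyGetD config i "").toList) '?'
    (fun st j c => pvStepA config st i j c) st

-- the ' ' cells of one enumerated row, as positions
def pvRowEmpties (i : Int) (qs : List (Int × Char)) : List (Int × Int) :=
  (qs.filter (fun q => q.2 == ' ')).map (fun q => (i, q.1))

def pvEmpties (rows : List (Int × String)) : List (Int × Int) :=
  rows.flatMap (fun p => pvRowEmpties p.1 (PySem.List.enumerate p.2.toList 0))

@[simp] lemma prod4_eta {α β γ δ : Type} (S : α × β × γ × δ) :
    (S.1, S.2.1, S.2.2.1, S.2.2.2) = S := rfl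

lemma stepA_split (config : List String) (e : List (Int × Int)) (xy : Option (Int × Int))
    (bx gl : List (Int × Int)) (out : List (List String)) (i j : Int) (c : Char) :
    pvStepA config (e, xy, bx, gl, out) i j c
      = ((pvStepB (e, xy, bx, gl) i j c).1, (pvStepB (e, xy, bx, gl) i j c).2.1,
         (pvStepB (e, xy, bx, gl) i j c).2.2.1, (pvStepB (e, xy, bx, gl) i j c).2.2.2,
         out ++ if c = ' ' then [pvWall config i j] else []) := by
  by_cases h1 : c = ' ' <;> by_cases h2 : c = '@' <;> by_cases h3 : c = '$' <;> by_cases h4 : c = '*' <;>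
    simp_all [pvStepA, pvStepB, pvWall]

-- inner loop: A's step = B's step plus the wall boards of the new empty cells
lemma innerAB (config : List String) (i : Int) (qs : List (Int × Char))
    (e : List (Int × Int)) (xy : Option (Int × Int)) (bx gl : List (Int × Int)) (out : List (List String)) :
    qs.foldl (fun st q => pvStepA config st i q.1 q.2) (e, xy, bx, gl, out)
      = ((qs.foldl (fun st q => pvStepB st i q.1 q.2) (e, xy, bx, gl)).1,
         (qs.foldl (fun st q => pvStepB st i q.1 q.2) (e, xy, bx, gl)).2.1,
         (qs.foldl (fun st q => pvStepB st i q.1 q.2) (e, xy, bx, gl)).2.2.1,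
         (qs.foldl (fun st q => pvStepB st i q.1 q.2) (e, xy, bx, gl)).2.2.2,
         out ++ (pvRowEmpties i qs).map (fun ij => pvWall config ij.1 ij.2)) := by
  induction qs generalizing e xy bx gl out with
  | nil => simp [pvRowEmpties]
  | cons q rest ih =>
    obtain ⟨j, c⟩ := q
    simp only [List.foldl_cons, stepA_split, ih, prod4_eta]
    by_cases hc : c = ' ' <;>
      simp [hc, pvRowEmpties]

-- outer loop: the same statement lifted over the rows
lemma outerAB (config : List String) (rows : List (Int × String))
    (e : List (Int × Int)) (xy : Option (Int × Int)) (bx gl : List (Int × Int)) (out : List (List String)) :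
    rows.foldl (fun st p =>
        (PySem.List.enumerate p.2.toList 0).foldl (fun st q => pvStepA config st p.1 q.1 q.2) st)
        (e, xy, bx, gl, out)
      = ((rows.foldl (fun st p =>
            (PySem.List.enumerate p.2.toList 0).foldl (fun st q => pvStepB st p.1 q.1 q.2) st)
            (e, xy, bx, gl)).1,
         (rows.foldl (fun st p =>
            (PySem.List.enumerate p.2.toList 0).foldl (fun st q => pvStepB st p.1 q.1 q.2) st)
            (e, xy, bx, gl)).2.1,
         (rows.foldl (fun st p =>
            (PySem.List.enumerate p.2.toList 0).foldl (fun st q => pvStepB st p.1 q.1 q.2) st)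
            (e, xy, bx, gl)).2.2.1,
         (rows.foldl (fun st p =>
            (PySem.List.enumerate p.2.toList 0).foldl (fun st q => pvStepB st p.1 q.1 q.2) st)
            (e, xy, bx, gl)).2.2.2,
         out ++ (pvEmpties rows).map (fun ij => pvWall config ij.1 ij.2)) := by
  induction rows generalizing e xy bx gl out with
  | nil => simp [pvEmpties]
  | cons p rest ih =>
    simp only [List.foldl_cons, innerAB, ih, prod4_eta]
    simp [pvEmpties, List.flatMap_cons, List.map_append]

-- B's empty-cell list grows by exactly the scanned empties, from any starting state
lemma stepB_fst (e : List (Int × Int)) (xy : Option (Int × Int)) (bx gl : List (Int × Int))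
    (i j : Int) (c : Char) :
    (pvStepB (e, xy, bx, gl) i j c).1 = e ++ if c = ' ' then [(i, j)] else [] := by
  by_cases h1 : c = ' ' <;> by_cases h2 : c = '@' <;> by_cases h3 : c = '$' <;> by_cases h4 : c = '*' <;>
    simp_all [pvStepB]

lemma scanB_empties_row (i : Int) (qs : List (Int × Char))
    (e : List (Int × Int)) (xy : Option (Int × Int)) (bx gl : List (Int × Int)) :
    (qs.foldl (fun st q => pvStepB st i q.1 q.2) (e, xy, bx, gl)).1 = e ++ pvRowEmpties i qs := by
  induction qs generalizing e xy bx gl with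
  | nil => simp [pvRowEmpties]
  | cons q rest ih =>
    obtain ⟨j, c⟩ := q
    simp only [List.foldl_cons]
    have h := ih (pvStepB (e, xy, bx, gl) i j c).1 (pvStepB (e, xy, bx, gl) i j c).2.1
      (pvStepB (e, xy, bx, gl) i j c).2.2.1 (pvStepB (e, xy, bx, gl) i j c).2.2.2
    rw [prod4_eta] at h
    rw [h, stepB_fst]
    by_cases hc : c = ' ' <;> simp [hc, pvRowEmpties]

lemma scanB_empties (rows : List (Int × String))
    (e : List (Int × Int)) (xy : Option (Int × Int)) (bx gl : List (Int × Int)) :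
    (rows.foldl (fun st p =>
        (PySem.List.enumerate p.2.toList 0).foldl (fun st q => pvStepB st p.1 q.1 q.2) st)
        (e, xy, bx, gl)).1 = e ++ pvEmpties rows := by
  induction rows generalizing e xy bx gl with
  | nil => simp [pvEmpties]
  | cons p rest ih =>
    simp only [List.foldl_cons]
    rcases hS : (PySem.List.enumerate p.2.toList 0).foldl (fun st q => pvStepB st p.1 q.1 q.2)
        (e, xy, bx, gl) with ⟨E', X', B', G'⟩
    have h1 : E' = e ++ pvRowEmpties p.1 (PySem.List.enumerate p.2.toList 0) := by
      rw [← scanB_empties_row p.1 (PySem.List.enumerate p.2.toList 0) e xy bx gl, hS]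
    rw [hS, ih, h1]
    simp [pvEmpties, List.append_assoc]

-- A's second phase, flattened against B's applied move operations
lemma phase2_eq (config : List String) (E BX Gs : List (Int × Int)) (xy : Option (Int × Int))
    (out0 : List (List String)) :
    E.foldl (fun out ij =>
      let xv := xy.getD (0, 0)
      let out := out ++ [pvRender (pvSetCell (pvSetCell (pvCopy config) ij.1 ij.2 '@') xv.1 xv.2 ' ')]
      let out := BX.foldl (fun out hk =>
        out ++ [pvRender (pvSetCell (pvSetCell (pvCopy config) ij.1 ij.2 '$') hk.1 hk.2 ' ')]) out
      Gs.foldl (fun out hk =>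
        out ++ [pvRender (pvSetCell (pvSetCell (pvCopy config) ij.1 ij.2 '*') hk.1 hk.2 ' ')]) out) out0
      = out0 ++ E.flatMap (fun ij =>
          pvApplyOp config [(ij.1, ij.2, '@'), ((xy.getD (0, 0)).1, (xy.getD (0, 0)).2, ' ')] ::
          (BX.map (fun hk => pvApplyOp config [(ij.1, ij.2, '$'), (hk.1, hk.2, ' ')]) ++
           Gs.map (fun hk => pvApplyOp config [(ij.1, ij.2, '*'), (hk.1, hk.2, ' ')]))) := by
  induction E generalizing out0 with
  | nil => simp
  | cons ij rest ih =>
    simp only [List.foldl_cons, List.flatMap_cons]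
    rw [PySem.List.foldl_append_singleton_eq_map, PySem.List.foldl_append_singleton_eq_map, ih]
    simp [List.append_assoc]

-- ===== VERDICT (by name: the statement is the Claim_ definition above) =====
theorem generate_boards_spec : Claim_equal_generate_boards := by
  intro config _ _
  show generate_boards config = generate_boards_alt config
  unfold generate_boards generate_boards_alt
  rw [scanA_enum, outerAB]
  have hfold : (PySem.List.enumerate config 0).foldl (fun st p =>
      (PySem.List.enumerate p.2.toList 0).foldl (fun st q => pvStepB st p.1 q.1 q.2) st)
      ([], none, [], []) = pvScanB config := rfl
  have hE := scanB_empties (PySem.List.enumerate config 0) [] none [] []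
  rw [hfold] at hE ⊢
  rcases hS : pvScanB config with ⟨E, XY, BX, Gs⟩
  rw [hS] at hE
  simp only at hE ⊢
  rw [phase2_eq]
  rw [hE]
  simp [pvOps, List.map_append, List.map_flatMap, List.map_map, pvWall, Function.comp_def]
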